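-- pv_equiv track=rewrite | github.com/wananer/pp-Evolution-World-Assistant | plugins/world_evolution_core/local_semantic_memory.py | _extract_query_terms
-- ===== SOURCE A (Python) =====
-- def _extract_query_terms(query: str) -> list[str]:
--     terms: list[str] = []
--     current = []
--     for char in str(query or ""):
--         if "\u4e00" <= char <= "\u9fff" or char.isalnum():
--             current.append(char)
--             continue
--         if len(current) >= 2:
--             terms.extend(_term_variants("".join(current)))
--         current = []
--     if len(current) >= 2:
--         terms.extend(_term_variants("".join(current)))
--     return _dedupe_strings([term[-12:] for term in terms if len(term) <= 24])
--
-- def _term_variants(term: str) -> list[str]: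
--     if len(term) <= 8:
--         return [term]
--     variants = [term[-12:]]
--     for size in (2, 3, 4):
--         for index in range(0, max(len(term) - size + 1, 0), size):
--             part = term[index : index + size]
--             if len(part) >= 2:
--                 variants.append(part)
--     return variants
--
-- def _dedupe_strings(items: list[str]) -> list[str]:
--     seen: set[str] = set()
--     result: list[str] = []
--     for item in items:
--         value = str(item or "").strip()
--         if not value or value in seen:
--             continue
--         seen.add(value)
--         result.append(value)
--     return result
-- ===== SOURCE B (Python) =====
-- def _keep(ch):
--     return "\u4e00" <= ch <= "\u9fff" or ch.isalnum()
--
--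
-- def _peel(t, size):
--     # non-overlapping full-size chunks, peeled off by a moving cursor
--     chunks = []
--     start = 0
--     while start + size <= len(t):
--         chunks.append(t[start:start + size])
--         start += size
--     return chunks
--
--
-- def _variants(term):
--     if len(term) <= 8:
--         return [term]
--     out = [term[-12:]]
--     for size in (2, 3, 4):
--         out += _peel(term, size)
--     return out
--
--
-- def _extract_query_terms(query):
--     s = str(query or "")
--     out = {}  # insertion-ordered dict doubles as the dedupe structure
--     i, n = 0, len(s)
--     while i < n:
--         if not _keep(s[i]):
--             i += 1
--             continue
--         j = i + 1
--         while j < n and _keep(s[j]):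
--             j += 1
--         if j - i >= 2:
--             for v in _variants(s[i:j]):
--                 out.setdefault(v, True)
--         i = j
--     return list(out)
-- ===== Notes on version B (the rewrite author's own statement) =====
-- stated objective: alternative
-- what changed: B fuses A's staged pipeline (build full variant list, then truncate, strip and seen-set dedupe passes) into one indexed while-loop scan that finds each maximal kept run in place and feeds its variants straight into an insertion-ordered dict, generates fixed-size chunks by recursive front-peeling instead of A's stride-range slicing, and has no truncate/strip/length-filter stages at all since every emitted variant is already at most 12 non-space characters.
import Mathlib
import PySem

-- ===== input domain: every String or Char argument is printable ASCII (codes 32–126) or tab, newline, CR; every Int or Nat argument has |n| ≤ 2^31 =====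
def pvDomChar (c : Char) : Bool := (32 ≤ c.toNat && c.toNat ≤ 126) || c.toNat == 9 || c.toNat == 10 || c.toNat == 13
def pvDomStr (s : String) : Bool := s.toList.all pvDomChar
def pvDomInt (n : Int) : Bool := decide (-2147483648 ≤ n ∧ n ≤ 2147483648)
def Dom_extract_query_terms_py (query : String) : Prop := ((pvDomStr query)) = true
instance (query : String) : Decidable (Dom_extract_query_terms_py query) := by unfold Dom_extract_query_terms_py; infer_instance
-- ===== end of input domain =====

-- B fuses run-scanning, variant generation and dedupe into one indexed scan over the string with an
-- insertion-ordered dict, peels fixed-size chunks recursively instead of stride-range slicing, and drops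
-- A's truncate/strip/length-filter stages (every variant is already ≤ 12 non-space chars) — alternative
-- decomposition, same return value.

-- ===== PORT A =====
def keepCharA (c : Char) : Bool :=
  (decide (0x4e00 ≤ c.toNat) && decide (c.toNat ≤ 0x9fff)) || PySem.Chars.isalnum c

def termVariantsA (term : List Char) : List (List Char) :=
  if term.length ≤ 8 then [term]
  else
    ([2, 3, 4] : List Int).foldl (fun variants size =>
        (PySem.List.pyRange 0 (max ((term.length : Int) - size + 1) 0) size).foldl
          (fun variants index =>
            let part := PySem.List.slice term (some index) (some (index + size))
            if 2 ≤ part.length then variants ++ [part] else variants)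
          variants)
      [PySem.List.slice term (some (-12)) none]

def dedupeStringsA (items : List (List Char)) : List (List Char) :=
  (items.foldl
    (fun (st : PySem.Set (List Char) × List (List Char)) item =>
      let value := PySem.Chars.strip (if item.isEmpty then [] else item)
      if value.isEmpty || PySem.Set.contains st.1 value then st
      else (PySem.Set.add st.1 value, st.2 ++ [value]))
    ((PySem.Set.empty : PySem.Set (List Char)), [])).2

def extract_query_terms_py (query : String) : List String :=
  let s := if query.toList.isEmpty then [] else query.toList
  let st := s.foldl
    (fun (st : List (List Char) × List Char) c =>
      if keepCharA c then (st.1, st.2 ++ [c])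
      else if 2 ≤ st.2.length then (st.1 ++ termVariantsA st.2, []) else (st.1, []))
    ([], [])
  let terms := if 2 ≤ st.2.length then st.1 ++ termVariantsA st.2 else st.1
  (dedupeStringsA
    ((terms.filter (fun t => t.length ≤ 24)).map
      (fun t => PySem.List.slice t (some (-12)) none))).map String.ofList

-- ===== PORT B =====
def keepCharB (c : Char) : Bool :=
  (decide (0x4e00 ≤ c.toNat) && decide (c.toNat ≤ 0x9fff)) || PySem.Chars.isalnum c

-- _peel's cursor loop; the '0 < size' conjunct is only a totality guard (Source B calls _peel with
-- size 2, 3 or 4, where the loop condition alone drives the cursor forward).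
def peelGo (t : List Char) (size : Nat) (chunks : List (List Char)) (start : Nat) :
    List (List Char) :=
  if _h : start + size ≤ t.length ∧ 0 < size then
    peelGo t size (chunks ++ [(t.drop start).take size]) (start + size)
  else chunks
termination_by t.length - start
decreasing_by omega

def peelB (t : List Char) (size : Nat) : List (List Char) :=
  peelGo t size [] 0

def variantsB (term : List Char) : List (List Char) :=
  if term.length ≤ 8 then [term]
  else
    ([2, 3, 4] : List Nat).foldl (fun out size => out ++ peelB term size)
      [PySem.List.slice term (some (-12)) none]

-- the while-loop scan: skip a non-kept char, otherwise take the maximal kept run (the inner while)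
-- and push its variants through the ordered-dict (setdefault) dedupe accumulator
def scanB (acc : PySem.Set (List Char)) : List Char → PySem.Set (List Char)
  | [] => acc
  | c :: cs =>
      if keepCharB c = false then scanB acc cs
      else
        scanB
          (if 2 ≤ (c :: cs.takeWhile keepCharB).length then
            (variantsB (c :: cs.takeWhile keepCharB)).foldl PySem.Set.add acc
           else acc)
          (cs.dropWhile keepCharB)
termination_by s => s.length
decreasing_by
  all_goals have := List.length_dropWhile_le keepCharB cs
  all_goals simp only [List.length_cons]
  all_goals omega

def extract_query_terms_py_alt (query : String) : List String :=
  let s := if query.toList.isEmpty then [] else query.toList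
  (scanB PySem.Set.empty s).map String.ofList

-- ===== PRECONDITION & SPEC =====
def Spec_extract_query_terms_py (query : String) (out : List String) : Prop := out = extract_query_terms_py_alt query
instance (query : String) (out : List String) : Decidable (Spec_extract_query_terms_py query out) := by unfold Spec_extract_query_terms_py; infer_instance

-- ===== CLAIM (what is proved, stated in full; the proofs are below) =====
def Claim_equal_extract_query_terms_py : Prop := ∀ (query : String), Dom_extract_query_terms_py query → Spec_extract_query_terms_py query (extract_query_terms_py query)

-- ===== LEMMAS AND PROOFS =====

theorem keepB_eq_A : keepCharB = keepCharA := rfl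

-- A's kept characters are never whitespace (so .strip() on a run variant is the identity)
theorem keepA_not_isspace (c : Char) (h : keepCharA c = true) : PySem.Chars.isspace c = false := by
  simp only [keepCharA, PySem.Chars.isalnum, PySem.Chars.isalpha, PySem.Chars.isdigit,
    PySem.Chars.isupper, PySem.Chars.islower, Bool.or_eq_true, Bool.and_eq_true,
    decide_eq_true_eq] at h
  have hb : (97 ≤ c.toNat ∧ c.toNat ≤ 122) ∨ (65 ≤ c.toNat ∧ c.toNat ≤ 90) ∨
      (48 ≤ c.toNat ∧ c.toNat ≤ 57) ∨ (0x4e00 ≤ c.toNat ∧ c.toNat ≤ 0x9fff) := by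
    rcases h with ⟨h1, h2⟩ | (⟨h1, h2⟩ | ⟨h1, h2⟩) | ⟨h1, h2⟩
    · exact Or.inr (Or.inr (Or.inr ⟨h1, h2⟩))
    · exact Or.inr (Or.inl ⟨Fin.mk_le_mk.mp h1, Fin.mk_le_mk.mp h2⟩)
    · exact Or.inl ⟨Fin.mk_le_mk.mp h1, Fin.mk_le_mk.mp h2⟩
    · exact Or.inr (Or.inr (Or.inl ⟨Fin.mk_le_mk.mp h1, Fin.mk_le_mk.mp h2⟩))
  simp only [PySem.Chars.isspace, Bool.or_eq_false_iff, Bool.and_eq_false_iff,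
    decide_eq_false_iff_not]
  omega

-- keep-runs of the char list, with a pending buffer, keeping only runs of length ≥ 2 (A's flush rule)
def runsF (cur : List Char) : List Char → List (List Char)
  | [] => if 2 ≤ cur.length then [cur] else []
  | c :: cs =>
      if keepCharA c then runsF (cur ++ [c]) cs
      else (if 2 ≤ cur.length then [cur] else []) ++ runsF [] cs

-- the same runs obtained structurally: maximal kept run via takeWhile/dropWhile (B's scan order)
def runsP : List Char → List (List Char)
  | [] => []
  | c :: cs =>
      if keepCharA c then
        (if 2 ≤ (c :: cs.takeWhile keepCharA).length then [c :: cs.takeWhile keepCharA] else []) ++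
          runsP (cs.dropWhile keepCharA)
      else runsP cs
termination_by s => s.length
decreasing_by
  all_goals have := List.length_dropWhile_le keepCharA cs
  all_goals simp only [List.length_cons]
  all_goals omega

theorem loopA_eq_runsF (cs : List Char) : ∀ (T : List (List Char)) (cur : List Char),
    (let st := cs.foldl
        (fun (st : List (List Char) × List Char) c =>
          if keepCharA c then (st.1, st.2 ++ [c])
          else if 2 ≤ st.2.length then (st.1 ++ termVariantsA st.2, []) else (st.1, []))
        (T, cur)
     if 2 ≤ st.2.length then st.1 ++ termVariantsA st.2 else st.1)
    = T ++ (runsF cur cs).flatMap termVariantsA := by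
  induction cs with
  | nil =>
      intro T cur
      simp only [List.foldl_nil, runsF]
      split <;> simp
  | cons c cs ih =>
      intro T cur
      simp only [List.foldl_cons, runsF]
      by_cases hk : keepCharA c = true
      · simp only [hk, if_true]
        exact ih T (cur ++ [c])
      · simp only [Bool.not_eq_true] at hk
        simp only [hk, Bool.false_eq_true, if_false]
        by_cases hl : 2 ≤ cur.length
        · simp only [hl, if_true]
          rw [ih (T ++ termVariantsA cur) []]
          simp
        · simp only [hl, if_false]
          rw [ih T []]
          simp

theorem runsP_unfold (cs : List Char) :
    runsP cs = (if 2 ≤ (cs.takeWhile keepCharA).length then [cs.takeWhile keepCharA] else []) ++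
      runsP (cs.dropWhile keepCharA) := by
  cases cs with
  | nil => simp [runsP]
  | cons c cs =>
      by_cases hk : keepCharA c = true
      · simp [runsP, hk]
      · simp only [Bool.not_eq_true] at hk
        simp [runsP, hk]

theorem runsF_takeWhile (cs : List Char) : ∀ cur,
    runsF cur cs
      = (if 2 ≤ (cur ++ cs.takeWhile keepCharA).length then [cur ++ cs.takeWhile keepCharA] else []) ++
        runsP (cs.dropWhile keepCharA) := by
  induction cs with
  | nil => intro cur; simp [runsF, runsP]
  | cons c cs ih =>
      intro cur
      by_cases hk : keepCharA c = true
      · simp only [runsF, hk, if_true, List.takeWhile_cons, List.dropWhile_cons,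
          Bool.not_eq_true]
        rw [ih (cur ++ [c])]
        simp
      · simp only [Bool.not_eq_true] at hk
        simp only [runsF, hk, Bool.false_eq_true, if_false, List.takeWhile_cons,
          List.dropWhile_cons, List.append_nil]
        rw [ih [], List.nil_append, ← runsP_unfold]
        have h2 : runsP (c :: cs) = runsP cs := by simp [runsP, hk]
        rw [← h2]

theorem runsF_nil_eq (cs : List Char) : runsF [] cs = runsP cs := by
  rw [runsF_takeWhile cs [], List.nil_append, ← runsP_unfold]

theorem mem_runsP (cs : List Char) (r : List Char) (hr : r ∈ runsP cs) :
    2 ≤ r.length ∧ ∀ c ∈ r, keepCharA c = true := by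
  induction cs using runsP.induct with
  | case1 => simp [runsP] at hr
  | case2 c cs hk ih =>
      rw [runsP] at hr
      simp only [hk, if_true, List.mem_append] at hr
      rcases hr with hr | hr
      · by_cases hl : 2 ≤ (c :: cs.takeWhile keepCharA).length
        · simp only [hl, if_true, List.mem_singleton] at hr
          subst hr
          refine ⟨hl, ?_⟩
          intro x hx
          rcases List.mem_cons.mp hx with rfl | hx
          · exact hk
          · exact List.mem_takeWhile_imp hx
        · rw [if_neg hl] at hr
          simp at hr
      · exact ih hr
  | case3 c cs hk ih =>
      rw [runsP] at hr
      simp only [hk, Bool.false_eq_true, if_false] at hr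
      exact ih hr

-- closed form of the cursor loop: the k-th chunk starts at start + k*size
theorem peelGo_eq (size : Nat) (hs : 1 ≤ size) (t : List Char) : ∀ (start : Nat) (chunks : List (List Char)),
    peelGo t size chunks start
      = chunks ++ (List.range ((t.length - start) / size)).map
          (fun k => (t.drop (start + size * k)).take size) := by
  suffices H : ∀ (n : Nat) (start : Nat), t.length - start = n → ∀ chunks,
      peelGo t size chunks start
        = chunks ++ (List.range ((t.length - start) / size)).map
            (fun k => (t.drop (start + size * k)).take size) by
    intro start chunks; exact H (t.length - start) start rfl chunks
  intro n
  induction n using Nat.strong_induction_on with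
  | _ n ih =>
    intro start hstart chunks
    by_cases h : start + size ≤ t.length
    · rw [peelGo, dif_pos ⟨h, by omega⟩]
      rw [ih (t.length - (start + size)) (by omega) (start + size) rfl]
      rw [show t.length - start = (t.length - (start + size)) + size from by omega,
        Nat.add_div_right _ (by omega), List.range_succ_eq_map]
      simp only [List.map_cons, List.map_map, Nat.mul_zero, Nat.add_zero, List.append_assoc,
        List.cons_append, List.nil_append]
      congr 1
      congr 1
      apply List.map_congr_left
      intro k _
      simp only [Function.comp_apply]
      rw [show start + size + size * k = start + size * k.succ from by rw [Nat.mul_succ]; omega]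
    · rw [peelGo, dif_neg (by omega)]
      have hz : (t.length - start) / size = 0 := Nat.div_eq_of_lt (by omega)
      rw [hz]
      simp

theorem peelB_eq_map (size : Nat) (hs : 1 ≤ size) (t : List Char) :
    peelB t size = (List.range (t.length / size)).map (fun k => (t.drop (size * k)).take size) := by
  unfold peelB
  rw [peelGo_eq size hs t 0 []]
  simp

theorem mem_peelB (t : List Char) (size : Nat) (hs : 1 ≤ size) :
    ∀ v ∈ peelB t size, v.length = size ∧ ∀ c ∈ v, c ∈ t := by
  intro v hv
  rw [peelB_eq_map size hs t, List.mem_map] at hv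
  obtain ⟨k, hk, rfl⟩ := hv
  rw [List.mem_range] at hk
  refine ⟨?_, fun c hc => List.mem_of_mem_drop (List.mem_of_mem_take hc)⟩
  have h2 : size * (k + 1) ≤ size * (t.length / size) := Nat.mul_le_mul_left size hk
  have h3 : t.length / size * size ≤ t.length := Nat.div_mul_le_self _ _
  have h4 : size * (k + 1) = size * k + size := by rw [Nat.mul_succ]
  have h5 : size * (t.length / size) = t.length / size * size := Nat.mul_comm _ _
  simp only [List.length_take, List.length_drop]
  omega

-- A's stride-range chunk loop for one size equals recursive peeling
theorem chunk_foldl (size : Nat) (hs : 2 ≤ size) (term : List Char) (acc : List (List Char)) :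
    (PySem.List.pyRange 0 (max ((term.length : Int) - (size : Int) + 1) 0) (size : Int)).foldl
      (fun variants index =>
        let part := PySem.List.slice term (some index) (some (index + (size : Int)))
        if 2 ≤ part.length then variants ++ [part] else variants)
      acc
    = acc ++ peelB term size := by
  have hstep : (0:Int) < (size:Int) := by exact_mod_cast (by omega : 0 < size)
  have hfold := PySem.List.foldl_append_if
      (fun i => decide (2 ≤ (PySem.List.slice term (some i) (some (i + (size:Int)))).length))
      (fun i => PySem.List.slice term (some i) (some (i + (size:Int))))
      (PySem.List.pyRange 0 (max ((term.length : Int) - (size:Int) + 1) 0) (size:Int)) acc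
  simp only [decide_eq_true_eq] at hfold
  rw [hfold]
  congr 1
  by_cases hlen : term.length < size
  · have hmax : max ((term.length : Int) - (size:Int) + 1) 0 = 0 := by
      rw [max_eq_right]; push_cast; omega
    rw [hmax, PySem.List.pyRange_of_pos 0 0 hstep, peelB_eq_map size (by omega) term,
      Nat.div_eq_of_lt hlen]
    simp
  · rw [Nat.not_lt] at hlen
    have hmax : max ((term.length : Int) - (size:Int) + 1) 0 = (term.length : Int) - (size:Int) + 1 := by
      rw [max_eq_left]; push_cast; omega
    rw [hmax, PySem.List.pyRange_of_pos 0 _ hstep]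
    have hpos : (0:Int) < (term.length : Int) - (size:Int) + 1 := by push_cast; omega
    rw [if_pos hpos]
    have hN : (((term.length : Int) - (size:Int) + 1 - 0 + (size:Int) - 1) / (size:Int)).toNat
        = term.length / size := by
      have h1 : (term.length : Int) - (size:Int) + 1 - 0 + (size:Int) - 1 = (term.length : Int) := by
        ring
      rw [h1, ← Int.natCast_ediv, Int.toNat_natCast]
    rw [hN, List.filter_map, List.map_map]
    have hsl : ∀ k : Nat,
        PySem.List.slice term (some (0 + (size:Int) * (k:Int)))
          (some (0 + (size:Int) * (k:Int) + (size:Int)))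
        = (term.drop (size * k)).take size := by
      intro k
      have hc : (0 : Int) + (size:Int) * (k:Int) = ((size * k : Nat) : Int) := by push_cast; ring
      rw [hc, show ((size * k : Nat) : Int) + (size:Int) = ((size * k : Nat) : Int) + ((size : Nat) : Int) from rfl,
        PySem.List.slice_natCast_add]
    have hlenpart : ∀ k ∈ List.range (term.length / size),
        size ≤ term.length - size * k := by
      intro k hk
      rw [List.mem_range] at hk
      have h2 : size * (k + 1) ≤ size * (term.length / size) :=
        Nat.mul_le_mul_left size hk
      have h3 : term.length / size * size ≤ term.length := Nat.div_mul_le_self _ _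
      have h4 : size * (k + 1) = size * k + size := by rw [Nat.mul_succ]
      have h5 : size * (term.length / size) = term.length / size * size := Nat.mul_comm _ _
      omega
    rw [List.filter_eq_self.mpr ?hall]
    case hall =>
      intro k hk
      rw [List.mem_range] at hk
      simp only [Function.comp_apply, hsl, decide_eq_true_eq, List.length_take,
        List.length_drop]
      have := hlenpart k (List.mem_range.mpr hk)
      omega
    rw [peelB_eq_map size (by omega) term]
    apply List.map_congr_left
    intro k hk
    simp only [Function.comp_apply]
    rw [hsl k]

theorem chunk_foldl' (sizeI : Int) (size : Nat) (hI : sizeI = (size : Int)) (hs : 2 ≤ size)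
    (term : List Char) (acc : List (List Char)) :
    (PySem.List.pyRange 0 (max ((term.length : Int) - sizeI + 1) 0) sizeI).foldl
      (fun variants index =>
        let part := PySem.List.slice term (some index) (some (index + sizeI))
        if 2 ≤ part.length then variants ++ [part] else variants)
      acc
    = acc ++ peelB term size := by
  subst hI
  exact chunk_foldl size hs term acc

theorem termVariantsA_eq (term : List Char) : termVariantsA term = variantsB term := by
  unfold termVariantsA variantsB
  by_cases h : term.length ≤ 8
  · simp [h]
  · simp only [h, if_false, List.foldl_cons, List.foldl_nil]
    rw [chunk_foldl' 2 2 (by norm_num) (by omega),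
      chunk_foldl' 3 3 (by norm_num) (by omega),
      chunk_foldl' 4 4 (by norm_num) (by omega)]

theorem mem_variantsB (r v : List Char) (hr : 2 ≤ r.length) (hv : v ∈ variantsB r) :
    1 ≤ v.length ∧ v.length ≤ 12 ∧ ∀ c ∈ v, c ∈ r := by
  unfold variantsB at hv
  by_cases h : r.length ≤ 8
  · simp only [h, if_true, List.mem_singleton] at hv
    subst hv
    exact ⟨by omega, by omega, fun c hc => hc⟩
  · rw [Nat.not_le] at h
    simp only [if_neg (by omega : ¬ r.length ≤ 8), List.foldl_cons, List.foldl_nil,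
      List.mem_append, List.mem_singleton] at hv
    rcases hv with ((hv | hv) | hv) | hv
    · subst hv
      rw [PySem.List.slice_from_neg_ofNat r 12 (by omega)]
      refine ⟨?_, ?_, fun c hc => List.mem_of_mem_drop hc⟩ <;>
        simp only [List.length_drop] <;> omega
    · have h2 := mem_peelB r 2 (by omega) v hv
      exact ⟨by omega, by omega, h2.2⟩
    · have h2 := mem_peelB r 3 (by omega) v hv
      exact ⟨by omega, by omega, h2.2⟩
    · have h2 := mem_peelB r 4 (by omega) v hv
      exact ⟨by omega, by omega, h2.2⟩

theorem strip_eq_self (t : List Char) (h : ∀ c ∈ t, PySem.Chars.isspace c = false) :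
    PySem.Chars.strip t = t := by
  have key : ∀ (l : List Char), (∀ c ∈ l, PySem.Chars.isspace c = false) →
      List.dropWhile PySem.Chars.isspace l = l := by
    intro l hl
    cases l with
    | nil => rfl
    | cons a l => simp [hl a (by simp)]
  simp only [PySem.Chars.strip, PySem.Chars.lstrip, PySem.Chars.rstrip]
  rw [key t h, key t.reverse (fun c hc => h c (List.mem_reverse.mp hc)), List.reverse_reverse]

theorem scan_eq (acc : PySem.Set (List Char)) (s : List Char) :
    scanB acc s = (runsP s).foldl (fun a r => (variantsB r).foldl PySem.Set.add a) acc := by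
  induction acc, s using scanB.induct with
  | case1 acc => simp [scanB, runsP]
  | case2 acc c cs hk ih =>
      have hk' : keepCharA c = false := keepB_eq_A ▸ hk
      rw [scanB]
      simp only [hk, if_true]
      rw [ih, runsP]
      simp [hk']
  | case3 acc c cs hk ih =>
      have hkB : keepCharB c = true := by simpa using hk
      have hk' : keepCharA c = true := keepB_eq_A ▸ hkB
      have hTW : cs.takeWhile keepCharB = cs.takeWhile keepCharA := by rw [keepB_eq_A]
      have hDW : cs.dropWhile keepCharB = cs.dropWhile keepCharA := by rw [keepB_eq_A]
      rw [scanB]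
      simp only [hkB, Bool.true_eq_false, if_false, hTW, hDW]
      rw [runsP]
      simp only [hk', if_true, List.foldl_append]
      by_cases hl : 2 ≤ (c :: cs.takeWhile keepCharA).length
      · rw [hTW, hDW, dif_pos hl] at ih
        rw [if_pos hl, ih]
        have hl1 : 1 ≤ (cs.takeWhile keepCharA).length := by
          simp only [List.length_cons] at hl; omega
        simp [hl1]
      · rw [hTW, hDW, dif_neg hl] at ih
        rw [if_neg hl, ih]
        have hl1 : ¬ 1 ≤ (cs.takeWhile keepCharA).length := by
          simp only [List.length_cons] at hl; omega
        simp [hl1]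

-- A's seen-set dedupe loop is Python's ordered dedup of the stripped non-empty values
theorem strip_or_empty (item : List Char) :
    PySem.Chars.strip (if item.isEmpty then [] else item) = PySem.Chars.strip item := by
  cases item <;> rfl

theorem dedupe_loop (items : List (List Char)) : ∀ (s : PySem.Set (List Char)),
    (items.foldl
      (fun (st : PySem.Set (List Char) × List (List Char)) item =>
        let value := PySem.Chars.strip item
        if value.isEmpty || PySem.Set.contains st.1 value then st
        else (PySem.Set.add st.1 value, st.2 ++ [value]))
      (s, s)).2
    = PySem.Set.update s ((items.map PySem.Chars.strip).filter (fun v => v.isEmpty = false)) := by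
  induction items with
  | nil => intro s; simp [PySem.Set.update]
  | cons item rest ih =>
      intro s
      simp only [List.foldl_cons, List.map_cons, List.filter_cons]
      by_cases he : (PySem.Chars.strip item).isEmpty
      · simp only [he, Bool.true_or, if_true, decide_eq_true_eq]
        simpa [he] using ih s
      · simp only [he, Bool.false_or]
        by_cases hc : PySem.Set.contains s (PySem.Chars.strip item)
        · have hadd : PySem.Set.add s (PySem.Chars.strip item) = s := by
            simp only [PySem.Set.add, hc, if_true]
          simp only [hc, if_true, decide_eq_true_eq, PySem.Set.update,
            List.foldl_cons, hadd]
          simpa [PySem.Set.update] using ih s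
        · have hadd : PySem.Set.add s (PySem.Chars.strip item) = s ++ [PySem.Chars.strip item] := by
            simp only [PySem.Set.add, hc, Bool.false_eq_true, if_false]
          simp only [hc, Bool.false_eq_true, if_false, he, decide_eq_true_eq, if_true,
            PySem.Set.update, List.foldl_cons]
          rw [← hadd]
          simpa [PySem.Set.update] using ih (PySem.Set.add s (PySem.Chars.strip item))

theorem dedupeStringsA_eq (items : List (List Char)) :
    dedupeStringsA items
    = PySem.List.dedup ((items.map PySem.Chars.strip).filter (fun v => v.isEmpty = false)) := by
  unfold dedupeStringsA
  simp only [strip_or_empty]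
  have := dedupe_loop items (PySem.Set.empty : PySem.Set (List Char))
  simpa [PySem.List.dedup, PySem.Set.ofList, PySem.Set.update, PySem.Set.empty] using this

-- ===== VERDICT (by name: the statement is the Claim_ definition above) =====
theorem extract_query_terms_py_spec : Claim_equal_extract_query_terms_py := by
  intro query _
  unfold Spec_extract_query_terms_py
  unfold extract_query_terms_py extract_query_terms_py_alt
  dsimp only
  rw [loopA_eq_runsF]
  rw [List.nil_append, runsF_nil_eq]
  rw [show termVariantsA = variantsB from funext termVariantsA_eq]
  rw [dedupeStringsA_eq]
  set sl := if query.toList.isEmpty then [] else query.toList with hsl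
  have hT : ∀ v ∈ (runsP sl).flatMap variantsB,
      1 ≤ v.length ∧ v.length ≤ 12 ∧ ∀ c ∈ v, keepCharA c = true := by
    intro v hv
    rw [List.mem_flatMap] at hv
    obtain ⟨r, hr, hvr⟩ := hv
    have hrP := mem_runsP sl r hr
    have hv2 := mem_variantsB r v hrP.1 hvr
    exact ⟨hv2.1, hv2.2.1, fun c hc => hrP.2 c (hv2.2.2 c hc)⟩
  have hfilter : ((runsP sl).flatMap variantsB).filter (fun t => t.length ≤ 24)
      = (runsP sl).flatMap variantsB := by
    apply List.filter_eq_self.mpr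
    intro v hv
    have := (hT v hv).2.1
    simp only [decide_eq_true_eq]
    omega
  rw [hfilter]
  have hmap1 : ((runsP sl).flatMap variantsB).map (fun t => PySem.List.slice t (some (-12)) none)
      = (runsP sl).flatMap variantsB := by
    rw [List.map_congr_left (g := id) (fun v hv => by
      rw [PySem.List.slice_from_neg_ofNat v 12 (by omega)]
      have h12 := (hT v hv).2.1
      simp [Nat.sub_eq_zero_of_le h12]), List.map_id]
  rw [hmap1]
  have hmap2 : ((runsP sl).flatMap variantsB).map PySem.Chars.strip
      = (runsP sl).flatMap variantsB := by
    rw [List.map_congr_left (g := id) (fun v hv => by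
      have := (hT v hv).2.2
      exact strip_eq_self v (fun c hc => keepA_not_isspace c (this c hc))), List.map_id]
  rw [hmap2]
  have hfilter2 : ((runsP sl).flatMap variantsB).filter (fun v => v.isEmpty = false)
      = (runsP sl).flatMap variantsB := by
    apply List.filter_eq_self.mpr
    intro v hv
    have h1 := (hT v hv).1
    cases v with
    | nil => simp at h1
    | cons a l => simp
  rw [hfilter2]
  rw [scan_eq]
  rw [show (PySem.Set.empty : PySem.Set (List Char)) = [] from rfl]
  rw [← List.foldl_flatMap, ← PySem.Set.ofList_eq_foldl, ← PySem.List.dedup_eq_ofList]
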